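-- pv_equiv track=rewrite | github.com/Sdas08217/GFG-POTD | Jun_2025/Jun_20.py | validgroup
-- ===== SOURCE A (Python) =====
-- from collections import Counter
--
-- def validgroup(arr, k):
--     if len(arr) % k != 0:
--         return False
--
--     freq = Counter(arr)
--     for num in sorted(freq):
--         count = freq[num]
--         if count > 0:
--             for i in range(1, k):
--                 next_num = num + i
--                 if freq[next_num] < count:
--                     return False
--                 freq[next_num] -= count
--     return True
-- ===== SOURCE B (Python) =====
-- from collections import Counter, deque
--
-- def validgroup(arr, k):
--     if len(arr) % k != 0:
--         return False
--
--     cnt = Counter(arr)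
--     opened = deque()      # groups opened at each of the recent consecutive values
--     opened_groups = 0     # groups currently spanning the value being processed
--     last = None
--     for num in sorted(cnt):
--         if opened_groups > 0 and num != last + 1:
--             return False
--         c = cnt[num]
--         if opened_groups > c:
--             return False
--         opened.append(c - opened_groups)
--         opened_groups = c
--         last = num
--         if len(opened) == k:
--             opened_groups -= opened.popleft()
--     return opened_groups == 0
-- ===== Notes on version B (the rewrite author's own statement) =====
-- stated objective: alternative
-- what changed: Replaces A's mutate-future-frequency sweep (which subtracts each opened-group count from the next k-1 counter buckets, O(k) dict updates per distinct value) by a single left-to-right sweep over the sorted distinct values that maintains a sliding window 'opened' of recently opened group counts and their running sum, doing O(1) work per distinct value.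
-- outside the precondition, e.g. on validgroup([1, 2], -2): A returns True, B returns False; on validgroup([], -2): A returns True, B returns True
import Mathlib
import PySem

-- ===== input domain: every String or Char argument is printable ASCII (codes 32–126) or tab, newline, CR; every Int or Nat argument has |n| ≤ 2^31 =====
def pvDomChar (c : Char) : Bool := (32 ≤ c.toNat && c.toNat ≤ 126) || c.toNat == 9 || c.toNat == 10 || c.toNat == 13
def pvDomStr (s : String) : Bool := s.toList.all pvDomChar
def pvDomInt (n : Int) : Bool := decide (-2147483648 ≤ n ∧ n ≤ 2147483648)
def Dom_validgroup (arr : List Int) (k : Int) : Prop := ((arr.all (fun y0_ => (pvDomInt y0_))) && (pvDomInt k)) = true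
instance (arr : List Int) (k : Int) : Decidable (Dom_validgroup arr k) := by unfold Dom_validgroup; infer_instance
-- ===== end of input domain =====

-- B replaces A's "subtract the opened count from the next k-1 frequency buckets" inner loop
-- by a one-pass sweep with a sliding window of recently opened group counts (an alternative
-- algorithm; return values agree on the stated Pre_, which requires a usable group size k).

-- ===== PORT A =====
-- inner 'for i in range(1, k)' loop: none = `return False`
def vgInner (count num : Int) : List Int → PySem.Dict Int Int → Option (PySem.Dict Int Int)
  | [], freq => some freq
  | i :: is, freq =>
      let nn := num + i
      if freq.getD nn 0 < count then none
      else vgInner count num is (freq.modify nn 0 (· - count))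

-- outer 'for num in sorted(freq)' loop
def vgOuter (k : Int) : List Int → PySem.Dict Int Int → Bool
  | [], _ => true
  | num :: rest, freq =>
      let count := freq.getD num 0
      if 0 < count then
        match vgInner count num (PySem.List.pyRange 1 k 1) freq with
        | none => false
        | some freq' => vgOuter k rest freq'
      else vgOuter k rest freq

def validgroup (arr : List Int) (k : Int) : Bool :=
  if PySem.Int.mod (PySem.List.len arr) k ≠ 0 then false
  else
    let freq := PySem.Dict.counter arr
    vgOuter k (PySem.List.sorted freq.keys (fun x => x) false) freq

-- ===== PORT B =====
-- sweep over the sorted distinct values with a window `opened` of recently opened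
-- group counts and its running sum `og` (= groups spanning the current value)
def vgAltLoop (k : Int) (cnt : PySem.Dict Int Int) : List Int → List Int → Int → Option Int → Bool
  | [], _, og, _ => og == 0
  | num :: rest, opened, og, last =>
      if 0 < og && num != last.getD 0 + 1 then false
      else
        let c := cnt.getD num 0
        if og > c then false
        else
          let opened' := opened ++ [c - og]
          if PySem.List.len opened' == k then
            vgAltLoop k cnt rest opened'.tail (c - opened'.headD 0) (some num)
          else
            vgAltLoop k cnt rest opened' c (some num)

def validgroup_alt (arr : List Int) (k : Int) : Bool :=
  if PySem.Int.mod (PySem.List.len arr) k ≠ 0 then false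
  else
    let cnt := PySem.Dict.counter arr
    vgAltLoop k cnt (PySem.List.sorted cnt.keys (fun x => x) false) [] 0 none

-- ===== PRECONDITION & SPEC =====
-- Pre_ excludes k = 0, where A raises ZeroDivisionError, and negative k with |k| dividing
-- len(arr): a negative group size is outside the task's natural domain, and there A
-- degenerately returns True (its inner range(1, k) is empty so nothing is checked).
-- Negative k rejected by the len(arr) % k precheck stays inside Pre_ (both return False).
def Pre_validgroup (arr : List Int) (k : Int) : Prop :=
  1 ≤ k ∨ (k ≠ 0 ∧ PySem.Int.mod (PySem.List.len arr) k ≠ 0)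
instance (arr : List Int) (k : Int) : Decidable (Pre_validgroup arr k) := by unfold Pre_validgroup; infer_instance
def pvWitness_validgroup : List Int × Int := ([1, 2, 3, 2, 3, 4], 3)
def Spec_validgroup (arr : List Int) (k : Int) (out : Bool) : Prop := out = validgroup_alt arr k
instance (arr : List Int) (k : Int) (out : Bool) : Decidable (Spec_validgroup arr k out) := by unfold Spec_validgroup; infer_instance

-- ===== CLAIM (what is proved, stated in full; the proofs are below) =====
def Claim_equal_validgroup : Prop := ∀ (arr : List Int) (k : Int), Dom_validgroup arr k → Pre_validgroup arr k → Spec_validgroup arr k (validgroup arr k)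

-- ===== LEMMAS AND PROOFS =====

-- window demand: the total count of groups recorded in `opened` (whose last entry was
-- opened at value lb) that still span the value w (for w > lb)
def wd (k : Int) (opened : List Int) (lb w : Int) : Int :=
  (opened.drop (opened.length + (w - lb).toNat - k.toNat)).sum

lemma wd_nil (k lb w : Int) : wd k [] lb w = 0 := by
  simp [wd]

lemma wd_nonneg (k : Int) (opened : List Int) (lb w : Int)
    (h : ∀ e ∈ opened, 0 ≤ e) : 0 ≤ wd k opened lb w :=
  List.sum_nonneg (fun x hx => h x (List.mem_of_mem_drop hx))

lemma wd_le_sum (k : Int) (opened : List Int) (lb w : Int)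
    (h : ∀ e ∈ opened, 0 ≤ e) : wd k opened lb w ≤ opened.sum := by
  unfold wd
  set m := opened.length + (w - lb).toNat - k.toNat with hm
  have hsplit := List.sum_take_add_sum_drop opened m
  have htake : 0 ≤ (opened.take m).sum :=
    List.sum_nonneg (fun x hx => h x (List.mem_of_mem_take hx))
  omega

lemma wd_eq_zero (k : Int) (opened : List Int) (lb w : Int)
    (hsum : opened.sum = 0) (h : ∀ e ∈ opened, 0 ≤ e) : wd k opened lb w = 0 := by
  have h1 := wd_nonneg k opened lb w h
  have h2 := wd_le_sum k opened lb w h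
  omega

lemma wd_next (k : Int) (opened : List Int) (lb : Int)
    (hk : 1 ≤ k) (hlen : (opened.length : Int) ≤ k - 1) :
    wd k opened lb (lb + 1) = opened.sum := by
  unfold wd
  have h1 : lb + 1 - lb = 1 := by omega
  have h2 : (k.toNat : Int) = k := Int.toNat_of_nonneg (by omega)
  have h3 : opened.length + (lb + 1 - lb).toNat - k.toNat = 0 := by
    rw [h1]; omega
  rw [h3, List.drop_zero]

lemma wd_append (k lb num x w : Int) (opened : List Int)
    (hk : 1 ≤ k) (hlen : (opened.length : Int) ≤ k - 1)
    (hcase : num = lb + 1 ∨ (opened.sum = 0 ∧ ∀ e ∈ opened, 0 ≤ e))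
    (hw : num < w) :
    wd k (opened ++ [x]) num w = wd k opened lb w + (if w ≤ num + k - 1 then x else 0) := by
  have hK : (k.toNat : Int) = k := Int.toNat_of_nonneg (by omega)
  set n := opened.length with hn
  set j := (w - num).toNat with hj
  have hj1 : 1 ≤ j := by omega
  have hlen' : (opened ++ [x]).length = n + 1 := by simp [hn]
  have hidx : (opened ++ [x]).length + (w - num).toNat - k.toNat = n + 1 + j - k.toNat := by
    omega
  by_cases hcond : w ≤ num + k - 1
  · -- the new entry still spans w
    have hle : n + 1 + j - k.toNat ≤ n := by omega
    have hdrop : (opened ++ [x]).drop (n + 1 + j - k.toNat)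
        = opened.drop (n + 1 + j - k.toNat) ++ [x] :=
      List.drop_append_of_le_length hle
    rw [wd, hidx, hdrop, List.sum_append, List.sum_singleton, if_pos hcond]
    rcases hcase with hnum | ⟨hsum, hpos⟩
    · have hjj : (w - lb).toNat = j + 1 := by omega
      rw [wd, hjj]
      have : n + (j + 1) - k.toNat = n + 1 + j - k.toNat := by omega
      rw [this]
    · rw [wd_eq_zero k opened lb w hsum hpos]
      have hz : (opened.drop (n + 1 + j - k.toNat)).sum = 0 := by
        have ha : 0 ≤ (opened.drop (n + 1 + j - k.toNat)).sum :=
          List.sum_nonneg (fun e he => hpos e (List.mem_of_mem_drop he))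
        have hb := List.sum_take_add_sum_drop opened (n + 1 + j - k.toNat)
        have hc : 0 ≤ (opened.take (n + 1 + j - k.toNat)).sum :=
          List.sum_nonneg (fun e he => hpos e (List.mem_of_mem_take he))
        omega
      omega
  · -- w is beyond the reach of every entry of the new window
    have hge : n + 1 ≤ n + 1 + j - k.toNat := by omega
    have hdrop : (opened ++ [x]).drop (n + 1 + j - k.toNat) = [] :=
      List.drop_eq_nil_of_le (by simpa [hlen'] using hge)
    rw [wd, hidx, hdrop, if_neg hcond]
    rcases hcase with hnum | ⟨hsum, hpos⟩
    · have hjj : (w - lb).toNat = j + 1 := by omega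
      have hdrop2 : opened.drop (n + (w - lb).toNat - k.toNat) = [] := by
        apply List.drop_eq_nil_of_le; omega
      rw [wd, hdrop2]; simp
    · rw [wd_eq_zero k opened lb w hsum hpos]; simp

lemma wd_tail (k num w : Int) (l : List Int)
    (hk : 1 ≤ k) (hlen : l.length = k.toNat) (hw : num < w) :
    wd k l.tail num w = wd k l num w := by
  have hj1 : 1 ≤ (w - num).toNat := by omega
  unfold wd
  rw [← List.drop_one, List.drop_drop]
  simp only [List.length_drop]
  have hidx : 1 + (l.length - 1 + (w - num).toNat - k.toNat)
      = l.length + (w - num).toNat - k.toNat := by omega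
  rw [hidx]

lemma headD_add_tail_sum (l : List Int) (h : l ≠ []) : l.headD 0 + l.tail.sum = l.sum := by
  cases l with
  | nil => exact absurd rfl h
  | cons a t => simp

-- A's inner loop returns None as soon as one of the k-1 following buckets is short
lemma vgInner_eq_none (count num : Int) (is : List Int) :
    ∀ (freq : PySem.Dict Int Int), is.Nodup → ∀ i ∈ is, freq.getD (num + i) 0 < count →
    vgInner count num is freq = none := by
  induction is with
  | nil => intro freq _ i hi; cases hi
  | cons a as ih =>
    intro freq hnd i hi hlt
    simp only [vgInner]
    rcases List.mem_cons.mp hi with h | h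
    · subst h; simp [hlt]
    · by_cases ha : freq.getD (num + a) 0 < count
      · simp [ha]
      · rw [if_neg ha]
        apply ih _ (List.Nodup.of_cons hnd) i h
        rw [PySem.Dict.getD_modify]
        have hne : num + i ≠ num + a := by
          intro he
          have : i = a := by omega
          exact (List.nodup_cons.mp hnd).1 (this ▸ h)
        rw [if_neg hne]
        exact hlt

-- A's inner loop succeeds iff every following bucket is large enough, and then it has
-- subtracted `count` from each of them
lemma vgInner_eq_some (count num : Int) (is : List Int) :
    ∀ (freq : PySem.Dict Int Int), is.Nodup → (∀ i ∈ is, count ≤ freq.getD (num + i) 0) →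
    ∃ g, vgInner count num is freq = some g ∧
      ∀ w, g.getD w 0 = freq.getD w 0 - (if (w - num) ∈ is then count else 0) := by
  induction is with
  | nil => intro freq _ _; exact ⟨freq, rfl, by simp⟩
  | cons a as ih =>
    intro freq hnd h
    have ha := h a (by simp)
    have hnotlt : ¬ freq.getD (num + a) 0 < count := not_lt.mpr ha
    simp only [vgInner, if_neg hnotlt]
    have hside : ∀ i ∈ as, count ≤ (freq.modify (num + a) 0 (· - count)).getD (num + i) 0 := by
      intro i hi
      rw [PySem.Dict.getD_modify]
      have hne : num + i ≠ num + a := by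
        intro he
        have : i = a := by omega
        exact (List.nodup_cons.mp hnd).1 (this ▸ hi)
      rw [if_neg hne]
      exact h i (List.mem_cons_of_mem a hi)
    obtain ⟨g, hg, hgetD⟩ := ih (freq.modify (num + a) 0 (· - count)) (List.Nodup.of_cons hnd) hside
    refine ⟨g, hg, fun w => ?_⟩
    rw [hgetD w, PySem.Dict.getD_modify]
    by_cases hwa : w = num + a
    · subst hwa
      have h1 : num + a - num = a := by omega
      have h2 : (num + a - num) ∉ as := by rw [h1]; exact (List.nodup_cons.mp hnd).1
      have h3 : (num + a - num) ∈ a :: as := by rw [h1]; exact List.mem_cons_self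
      rw [if_pos rfl, if_neg h2, if_pos h3]
      ring
    · have h1 : w - num ≠ a := by omega
      rw [if_neg hwa]
      simp [List.mem_cons, h1]

-- If some value w ahead of the sweep cannot meet the demand already recorded in the
-- window, B's loop returns false no matter how the remaining keys look
lemma vgAltLoop_false (k : Int) (cnt : PySem.Dict Int Int) (hk : 1 ≤ k) :
    ∀ (rest opened : List Int) (og : Int) (lastOpt : Option Int) (lb w : Int),
    og = opened.sum → (∀ e ∈ opened, 0 ≤ e) → ((opened.length : Int) ≤ k - 1) →
    (0 < og → lastOpt = some lb) →
    (∀ v, lb < v → 0 ≤ cnt.getD v 0) →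
    lb < w → cnt.getD w 0 < wd k opened lb w →
    vgAltLoop k cnt rest opened og lastOpt = false := by
  intro rest
  induction rest with
  | nil =>
    intro opened og lastOpt lb w h1 h2 h3 h8 h0 hw hbad
    have hle := wd_le_sum k opened lb w h2
    have h0w := h0 w hw
    simp only [vgAltLoop]
    have : og ≠ 0 := by omega
    simp [this]
  | cons num rest ih =>
    intro opened og lastOpt lb w h1 h2 h3 h8 h0 hw hbad
    have hle := wd_le_sum k opened lb w h2
    have h0w := h0 w hw
    have hog : 0 < og := by omega
    have hlast := h8 hog
    subst hlast
    simp only [vgAltLoop, Option.getD_some]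
    by_cases hgap : num = lb + 1
    · -- consecutive: the gap test passes, examine the capacity test
      have hgapc : (decide (0 < og) && (num != lb + 1)) = false := by
        simp [hgap]
      rw [hgapc, if_neg (by simp)]
      by_cases hoc : og > cnt.getD num 0
      · rw [if_pos (by simpa using hoc)]
      · rw [if_neg (by simpa using hoc)]
        push Not at hoc
        have hwnum : w ≠ num := by
          intro he
          rw [he, hgap, wd_next k opened lb hk h3] at hbad
          rw [hgap] at hoc
          omega
        have hwgt : num < w := by omega
        set c := cnt.getD num 0 with hc
        have hx : 0 ≤ c - og := by omega
        have hR := wd_append k lb num (c - og) w opened hk h3 (Or.inl hgap) hwgt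
        have hbad' : cnt.getD w 0 < wd k (opened ++ [c - og]) num w := by
          rw [hR]
          by_cases hcc : w ≤ num + k - 1 <;> simp [hcc] <;> omega
        have h2' : ∀ e ∈ opened ++ [c - og], 0 ≤ e := by
          intro e he
          rcases List.mem_append.mp he with h | h
          · exact h2 e h
          · simp at h; omega
        have h0' : ∀ v, num < v → 0 ≤ cnt.getD v 0 := fun v hv => h0 v (by omega)
        by_cases hfull : ((opened ++ [c - og]).length : Int) = k
        · rw [if_pos (by simp only [PySem.List.len_eq]; exact beq_iff_eq.mpr hfull)]
          apply ih _ _ _ num w ?_ ?_ ?_ ?_ h0' hwgt ?_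
          · -- og invariant for the popped window
            have hne : opened ++ [c - og] ≠ [] := by simp
            have := headD_add_tail_sum (opened ++ [c - og]) hne
            rw [List.sum_append, List.sum_singleton] at this
            omega
          · exact fun e he => h2' e (List.mem_of_mem_tail he)
          · simp only [List.length_tail]
            simp only [List.length_append, List.length_singleton] at hfull ⊢
            omega
          · intro _; rfl
          · rw [wd_tail k num w _ hk (by omega) hwgt]
            exact hbad'
        · rw [if_neg (by simp only [PySem.List.len_eq]; exact fun hcon => hfull (beq_iff_eq.mp hcon))]
          apply ih _ _ _ num w ?_ h2' ?_ ?_ h0' hwgt hbad'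
          · rw [List.sum_append, List.sum_singleton]; omega
          · simp only [List.length_append, List.length_singleton] at hfull ⊢
            push_cast at hfull ⊢
            omega
          · intro _; rfl
    · -- a gap while groups are open: B fails immediately
      have : (decide (0 < og) && (num != lb + 1)) = true := by
        simp [hog, hgap]
      rw [this, if_pos rfl]

-- the state invariants of B's window survive one step of the sweep (both the popping
-- and the non-popping branch), and the demand it records grows by x on the next k-1 values
lemma window_step (k lb num x : Int) (opened : List Int) (W : List Int) (og' : Int)
    (hk : 1 ≤ k) (h2 : ∀ e ∈ opened, 0 ≤ e) (h3 : (opened.length : Int) ≤ k - 1)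
    (hx : 0 ≤ x)
    (hcase : num = lb + 1 ∨ (opened.sum = 0 ∧ ∀ e ∈ opened, 0 ≤ e))
    (hbr : ((((opened ++ [x]).length : Int) = k) ∧ W = (opened ++ [x]).tail ∧
              og' = (opened.sum + x) - (opened ++ [x]).headD 0)
         ∨ ((¬ ((opened ++ [x]).length : Int) = k) ∧ W = opened ++ [x] ∧
              og' = opened.sum + x)) :
    og' = W.sum ∧ (∀ e ∈ W, 0 ≤ e) ∧ ((W.length : Int) ≤ k - 1) ∧
    (∀ w', num < w' → wd k W num w' = wd k opened lb w' + (if w' ≤ num + k - 1 then x else 0)) := by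
  have h2' : ∀ e ∈ opened ++ [x], 0 ≤ e := by
    intro e he
    rcases List.mem_append.mp he with h | h
    · exact h2 e h
    · simp at h; omega
  rcases hbr with ⟨hfull, hW, hog⟩ | ⟨hfull, hW, hog⟩
  · subst hW
    have hne : opened ++ [x] ≠ [] := by simp
    have hht := headD_add_tail_sum (opened ++ [x]) hne
    rw [List.sum_append, List.sum_singleton] at hht
    refine ⟨by omega, fun e he => h2' e (List.mem_of_mem_tail he), ?_, fun w' hw' => ?_⟩
    · simp only [List.length_tail, List.length_append, List.length_singleton] at hfull ⊢
      omega
    · rw [wd_tail k num w' _ hk (by omega) hw']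
      exact wd_append k lb num x w' opened hk h3 hcase hw'
  · subst hW
    refine ⟨by rw [List.sum_append, List.sum_singleton]; omega, h2', ?_, fun w' hw' => ?_⟩
    · simp only [List.length_append, List.length_singleton] at hfull ⊢
      push_cast at hfull ⊢
      omega
    · exact wd_append k lb num x w' opened hk h3 hcase hw'

-- main simulation: under the sweep invariant, A's loop and B's loop agree
lemma vgMain (k : Int) (cnt : PySem.Dict Int Int) (hk : 1 ≤ k) :
    ∀ (rest : List Int) (freq : PySem.Dict Int Int) (opened : List Int) (og : Int)
      (lastOpt : Option Int) (lb : Int),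
    og = opened.sum →
    (∀ e ∈ opened, 0 ≤ e) →
    ((opened.length : Int) ≤ k - 1) →
    (0 < og → lastOpt = some lb) →
    (∀ w, lb < w → freq.getD w 0 = cnt.getD w 0 - wd k opened lb w) →
    (∀ w, lb < w → 0 ≤ freq.getD w 0) →
    rest.Pairwise (· < ·) →
    (∀ v ∈ rest, lb < v) →
    (∀ w, lb < w → (0 < cnt.getD w 0 ↔ w ∈ rest)) →
    vgOuter k rest freq = vgAltLoop k cnt rest opened og lastOpt := by
  intro rest
  induction rest with
  | nil =>
    intro freq opened og lastOpt lb h1 h2 h3 h8 h4 h9 h5 h6 h7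
    simp only [vgOuter, vgAltLoop]
    have hsum0 : 0 ≤ opened.sum := List.sum_nonneg h2
    have hog0 : og = 0 := by
      by_contra hne
      have hogpos : 0 < og := by omega
      have hwd := wd_next k opened lb hk h3
      have h4' := h4 (lb + 1) (by omega)
      have h9' := h9 (lb + 1) (by omega)
      have hc : 0 < cnt.getD (lb + 1) 0 := by omega
      exact absurd ((h7 (lb + 1) (by omega)).mp hc) (by simp)
    simp [hog0]
  | cons num rest ih =>
    intro freq opened og lastOpt lb h1 h2 h3 h8 h4 h9 h5 h6 h7
    have hnum_lb : lb < num := h6 num List.mem_cons_self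
    have hcnum : 0 < cnt.getD num 0 := (h7 num hnum_lb).mpr List.mem_cons_self
    have hsum0 : 0 ≤ opened.sum := List.sum_nonneg h2
    have hKG : 0 < og → num = lb + 1 := by
      intro hog
      have hwd := wd_next k opened lb hk h3
      have h4' := h4 (lb + 1) (by omega)
      have h9' := h9 (lb + 1) (by omega)
      have hc : 0 < cnt.getD (lb + 1) 0 := by omega
      have hmem := (h7 (lb + 1) (by omega)).mp hc
      rcases List.mem_cons.mp hmem with h | h
      · omega
      · have := (List.pairwise_cons.mp h5).1 (lb + 1) h
        omega
    have hcase : num = lb + 1 ∨ (opened.sum = 0 ∧ ∀ e ∈ opened, 0 ≤ e) := by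
      by_cases hog : 0 < og
      · exact Or.inl (hKG hog)
      · exact Or.inr ⟨by omega, h2⟩
    have hwdnum : wd k opened lb num = og := by
      by_cases hog : 0 < og
      · rw [hKG hog, wd_next k opened lb hk h3]; omega
      · rw [wd_eq_zero k opened lb num (by omega) h2]; omega
    have hcount : freq.getD num 0 = cnt.getD num 0 - og := by
      rw [h4 num hnum_lb, hwdnum]
    have hcount0 : 0 ≤ freq.getD num 0 := h9 num hnum_lb
    have hogc : og ≤ cnt.getD num 0 := by omega
    have hccnt : ∀ v, lb < v → 0 ≤ cnt.getD v 0 := by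
      intro v hv
      have := h4 v hv
      have := h9 v hv
      have := wd_nonneg k opened lb v h2
      omega
    have hgapc : (decide (0 < og) && (num != lastOpt.getD 0 + 1)) = false := by
      by_cases hog : 0 < og
      · rw [h8 hog]; simp [hKG hog]
      · have : og = 0 := by omega
        simp [this]
    set x := cnt.getD num 0 - og with hxdef
    have hx : 0 ≤ x := by omega
    have hB : vgAltLoop k cnt (num :: rest) opened og lastOpt
        = (if PySem.List.len (opened ++ [x]) == k then
            vgAltLoop k cnt rest (opened ++ [x]).tail
              (cnt.getD num 0 - (opened ++ [x]).headD 0) (some num)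
          else vgAltLoop k cnt rest (opened ++ [x]) (cnt.getD num 0) (some num)) := by
      simp only [vgAltLoop]
      rw [hgapc]
      simp only [Bool.false_eq_true, if_false]
      rw [if_neg (show ¬ (og > cnt.getD num 0) from not_lt.mpr hogc)]
    rw [hB]
    simp only [vgOuter]
    -- B's next state, uniformly over the popping branch
    have hbranch : ∀ (P : Bool → Prop),
        (∀ W og', (((((opened ++ [x]).length : Int) = k) ∧ W = (opened ++ [x]).tail ∧
              og' = (opened.sum + x) - (opened ++ [x]).headD 0)
            ∨ ((¬ ((opened ++ [x]).length : Int) = k) ∧ W = opened ++ [x] ∧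
              og' = opened.sum + x)) →
          P (vgAltLoop k cnt rest W og' (some num))) →
        P (if PySem.List.len (opened ++ [x]) == k then
            vgAltLoop k cnt rest (opened ++ [x]).tail
              (cnt.getD num 0 - (opened ++ [x]).headD 0) (some num)
          else vgAltLoop k cnt rest (opened ++ [x]) (cnt.getD num 0) (some num)) := by
      intro P hP
      by_cases hfull : ((opened ++ [x]).length : Int) = k
      · rw [if_pos (by simp only [PySem.List.len_eq]; exact beq_iff_eq.mpr hfull)]
        have he : cnt.getD num 0 - (opened ++ [x]).headD 0
            = (opened.sum + x) - (opened ++ [x]).headD 0 := by omega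
        rw [he]
        exact hP _ _ (Or.inl ⟨hfull, rfl, rfl⟩)
      · rw [if_neg (by simp only [PySem.List.len_eq]; exact fun hcon => hfull (beq_iff_eq.mp hcon))]
        have he : cnt.getD num 0 = opened.sum + x := by omega
        rw [he]
        exact hP _ _ (Or.inr ⟨hfull, rfl, rfl⟩)
    by_cases hcpos : 0 < freq.getD num 0
    · rw [if_pos hcpos]
      by_cases hfail : ∃ i, i ∈ PySem.List.pyRange 1 k 1 ∧ freq.getD (num + i) 0 < freq.getD num 0
      · -- A fails here: some bucket within reach of the groups opened at num is short;
        -- B keeps sweeping and fails later (vgAltLoop_false)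
        obtain ⟨i, hi, hilt⟩ := hfail
        obtain ⟨hi1, hik⟩ := PySem.List.mem_pyRange_one.mp hi
        rw [vgInner_eq_none (freq.getD num 0) num (PySem.List.pyRange 1 k 1) freq
              (PySem.List.nodup_pyRange_one 1 k) i hi hilt]
        change false = _
        apply hbranch (fun b => false = b)
        intro W og' hbr
        obtain ⟨hog', hW2, hW3, hWwd⟩ := window_step k lb num x opened W og' hk h2 h3 hx hcase hbr
        refine (vgAltLoop_false k cnt hk rest W og' (some num) num (num + i)
            hog' hW2 hW3 (fun _ => rfl) (fun v hv => hccnt v (by omega)) (by omega) ?_).symm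
        have hWw := hWwd (num + i) (by omega)
        have h4i := h4 (num + i) (by omega)
        rw [hWw, if_pos (by omega : num + i ≤ num + k - 1)]
        omega
      · -- A's inner loop succeeds: both sweeps advance with matching states
        push Not at hfail
        have hok : ∀ j ∈ PySem.List.pyRange 1 k 1, freq.getD num 0 ≤ freq.getD (num + j) 0 := hfail
        obtain ⟨g, hg, hgetD⟩ := vgInner_eq_some (freq.getD num 0) num (PySem.List.pyRange 1 k 1)
          freq (PySem.List.nodup_pyRange_one 1 k) hok
        rw [hg]
        apply hbranch (fun b => vgOuter k rest g = b)
        intro W og' hbr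
        obtain ⟨hog', hW2, hW3, hWwd⟩ := window_step k lb num x opened W og' hk h2 h3 hx hcase hbr
        apply ih g W og' (some num) num hog' hW2 hW3 (fun _ => rfl) ?_ ?_
          (List.Pairwise.of_cons h5) ?_ ?_
        · intro w hw
          rw [hgetD w, hWwd w hw, h4 w (by omega)]
          by_cases hcc : w ≤ num + k - 1
          · rw [if_pos (PySem.List.mem_pyRange_one.mpr ⟨by omega, by omega⟩), if_pos hcc]
            omega
          · rw [if_neg (fun hmem => hcc (by
                have := (PySem.List.mem_pyRange_one.mp hmem).2
                omega)), if_neg hcc]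
            omega
        · intro w hw
          rw [hgetD w]
          by_cases hmem : (w - num) ∈ PySem.List.pyRange 1 k 1
          · have hle := hok (w - num) hmem
            have hrw : num + (w - num) = w := by omega
            rw [hrw] at hle
            rw [if_pos hmem]
            omega
          · rw [if_neg hmem]
            have := h9 w (by omega)
            omega
        · intro v hv
          exact (List.pairwise_cons.mp h5).1 v hv
        · intro w hw
          rw [h7 w (by omega)]
          constructor
          · intro hmem
            rcases List.mem_cons.mp hmem with h | h
            · omega
            · exact h
          · exact fun h => List.mem_cons_of_mem _ h
    · -- all copies of num already consumed: A skips, B opens 0 new groups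
      rw [if_neg hcpos]
      have hx0 : x = 0 := by omega
      apply hbranch (fun b => vgOuter k rest freq = b)
      intro W og' hbr
      obtain ⟨hog', hW2, hW3, hWwd⟩ := window_step k lb num x opened W og' hk h2 h3 hx hcase hbr
      apply ih freq W og' (some num) num hog' hW2 hW3 (fun _ => rfl) ?_ ?_
        (List.Pairwise.of_cons h5) ?_ ?_
      · intro w hw
        rw [hWwd w hw, hx0]
        have hz : (if w ≤ num + k - 1 then (0:Int) else 0) = 0 := by simp
        rw [hz, h4 w (by omega)]
        omega
      · intro w hw
        exact h9 w (by omega)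
      · intro v hv
        exact (List.pairwise_cons.mp h5).1 v hv
      · intro w hw
        rw [h7 w (by omega)]
        constructor
        · intro hmem
          rcases List.mem_cons.mp hmem with h | h
          · omega
          · exact h
        · exact fun h => List.mem_cons_of_mem _ h

-- entry: starting from the freshly built counter and an empty window
lemma vgTop (k : Int) (cnt : PySem.Dict Int Int) (hk : 1 ≤ k) (S : List Int)
    (hpair : S.Pairwise (· < ·))
    (hnn : ∀ w, 0 ≤ cnt.getD w 0)
    (hmem : ∀ w, w ∈ S ↔ 0 < cnt.getD w 0) :
    vgOuter k S cnt = vgAltLoop k cnt S [] 0 none := by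
  cases S with
  | nil => simp [vgOuter, vgAltLoop]
  | cons v S' =>
    apply vgMain k cnt hk (v :: S') cnt [] 0 none (v - 1)
    · rfl
    · intro e he; cases he
    · simp; omega
    · intro h; exact absurd h (by omega)
    · intro w _; rw [wd_nil]; ring
    · intro w _; exact hnn w
    · exact hpair
    · intro u hu
      rcases List.mem_cons.mp hu with h | h
      · omega
      · have := (List.pairwise_cons.mp hpair).1 u h
        omega
    · intro w _
      exact (hmem w).symm

theorem validgroup_spec : Claim_equal_validgroup := by
  intro arr k _ hk
  show validgroup arr k = validgroup_alt arr k
  unfold validgroup validgroup_alt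
  by_cases hmod : PySem.Int.mod (PySem.List.len arr) k ≠ 0
  · rw [if_pos hmod, if_pos hmod]
  · have hk1 : 1 ≤ k := by
      rcases hk with h | ⟨_, h⟩
      · exact h
      · exact absurd h hmod
    rw [if_neg hmod, if_neg hmod]
    show vgOuter k (PySem.List.sorted (PySem.Dict.counter arr).keys (fun x => x) false)
          (PySem.Dict.counter arr)
        = vgAltLoop k (PySem.Dict.counter arr)
            (PySem.List.sorted (PySem.Dict.counter arr).keys (fun x => x) false) [] 0 none
    have hperm := PySem.List.sorted_perm (PySem.Dict.counter arr : PySem.Dict Int Int).keys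
      (fun x => x) false
    have hkeysnodup : (PySem.Dict.counter arr : PySem.Dict Int Int).keys.Nodup := by
      rw [PySem.Dict.keys_counter]
      exact PySem.Set.nodup_ofList arr
    have hSnodup := hperm.nodup_iff.mpr hkeysnodup
    have hpair_le := PySem.List.sorted_pairwise
      (PySem.Dict.counter arr : PySem.Dict Int Int).keys (fun x => x)
    have hpair := (hpair_le.and hSnodup).imp
      (fun h => lt_of_le_of_ne h.1 h.2)
    apply vgTop k (PySem.Dict.counter arr) hk1 _ hpair
    · intro w
      rw [PySem.Dict.getD_counter]
      exact_mod_cast Nat.zero_le _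
    · intro w
      rw [hperm.mem_iff, PySem.Dict.keys_counter, PySem.Dict.getD_counter]
      rw [PySem.Set.mem_ofList]
      constructor
      · intro h
        exact_mod_cast List.count_pos_iff.mpr h
      · intro h
        exact List.count_pos_iff.mp (by exact_mod_cast h)
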